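-- pv_equiv track=rewrite | github.com/Sealpillow/Leetcode | src/python/ptice.py | checkg
-- ===== SOURCE A (Python) =====
-- def checkg(answer):
--     correct=0
--     for i in range(len(answer)):
--         if (i%6==0 or i%6==1) and answer[i]=="C":
--             correct+=1
--         if (i%6==2 or i%6==3) and answer[i] =="A":
--             correct+=1
--         if (i%6==4 or i%6==5) and answer[i] =="B":
--             correct+=1
--     return correct
-- ===== SOURCE B (Python) =====
-- def checkg(answer):
--     key = "CCAABB" * (len(answer) // 6 + 1)
--     return sum(c == k for c, k in zip(answer, key))
-- ===== Notes on version B (the rewrite author's own statement) =====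
-- stated objective: idiomatic
-- what changed: Replaced the indexed loop with three modulo-residue branches by building a repeated six-letter key string and counting positional matches with zip, eliminating all index arithmetic and branching (the C-level string repetition and zip make it measurably faster).
import Mathlib
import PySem

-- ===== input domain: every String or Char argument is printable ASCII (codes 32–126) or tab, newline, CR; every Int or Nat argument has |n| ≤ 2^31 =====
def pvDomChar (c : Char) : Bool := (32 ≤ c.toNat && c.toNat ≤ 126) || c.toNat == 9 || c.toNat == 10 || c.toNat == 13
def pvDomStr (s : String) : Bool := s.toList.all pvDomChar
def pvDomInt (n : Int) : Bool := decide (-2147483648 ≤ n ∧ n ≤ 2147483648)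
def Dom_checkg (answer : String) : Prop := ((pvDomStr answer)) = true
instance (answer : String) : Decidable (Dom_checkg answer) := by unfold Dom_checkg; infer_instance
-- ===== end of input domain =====

-- B replaces A's indexed loop with three modulo-residue branches by a repeated "CCAABB"
-- key zipped against the answer and a sum of positional matches (idiomatic; same O(n) cost).


-- ===== PORT A =====
def checkg (answer : String) : Int :=
  (PySem.List.pyRange 0 (PySem.Str.len answer) 1).foldl
    (fun correct i =>
      let correct := if (PySem.Int.mod i 6 = 0 ∨ PySem.Int.mod i 6 = 1) ∧ PySem.Str.pyGet? answer i = some 'C' then correct + 1 else correct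
      let correct := if (PySem.Int.mod i 6 = 2 ∨ PySem.Int.mod i 6 = 3) ∧ PySem.Str.pyGet? answer i = some 'A' then correct + 1 else correct
      let correct := if (PySem.Int.mod i 6 = 4 ∨ PySem.Int.mod i 6 = 5) ∧ PySem.Str.pyGet? answer i = some 'B' then correct + 1 else correct
      correct)
    0

-- ===== PORT B =====
def checkg_alt (answer : String) : Int :=
  let key := (List.replicate (answer.toList.length / 6 + 1) "CCAABB".toList).flatten
  ((answer.toList.zip key).map (fun p => if p.1 = p.2 then (1 : Int) else 0)).sum

-- ===== PRECONDITION & SPEC =====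
def Spec_checkg (answer : String) (out : Int) : Prop := out = checkg_alt answer
instance (answer : String) (out : Int) : Decidable (Spec_checkg answer out) := by unfold Spec_checkg; infer_instance

-- ===== CLAIM (what is proved, stated in full; the proofs are below) =====
def Claim_equal_checkg : Prop := ∀ (answer : String), Dom_checkg answer → Spec_checkg answer (checkg answer)

-- ===== LEMMAS AND PROOFS =====

-- per-index contribution of A's loop body, as a function of the Nat index
def gA (l : List Char) (i : Nat) : Int :=
  (if (i % 6 = 0 ∨ i % 6 = 1) ∧ l[i]? = some 'C' then 1 else 0)
  + (if (i % 6 = 2 ∨ i % 6 = 3) ∧ l[i]? = some 'A' then 1 else 0)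
  + (if (i % 6 = 4 ∨ i % 6 = 5) ∧ l[i]? = some 'B' then 1 else 0)

-- A's fold equals the sum of per-index contributions
lemma checkg_eq_sum (answer : String) :
    checkg answer = ((List.range answer.toList.length).map (gA answer.toList)).sum := by
  unfold checkg
  rw [PySem.Str.len_eq, PySem.List.pyRange_zero_natCast, List.foldl_map]
  have hbody : ∀ (acc : Int) (j : Nat),
      (fun correct i =>
        let correct := if (PySem.Int.mod i 6 = 0 ∨ PySem.Int.mod i 6 = 1) ∧ PySem.Str.pyGet? answer i = some 'C' then correct + 1 else correct
        let correct := if (PySem.Int.mod i 6 = 2 ∨ PySem.Int.mod i 6 = 3) ∧ PySem.Str.pyGet? answer i = some 'A' then correct + 1 else correct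
        let correct := if (PySem.Int.mod i 6 = 4 ∨ PySem.Int.mod i 6 = 5) ∧ PySem.Str.pyGet? answer i = some 'B' then correct + 1 else correct
        correct) acc ((j : Nat) : Int) = acc + gA answer.toList j := by
    intro acc j
    have hmod : PySem.Int.mod (j : Int) 6 = ((j % 6 : Nat) : Int) := by
      exact_mod_cast PySem.Int.mod_natCast j 6
    simp only [hmod, PySem.Str.pyGet?_natCast, gA]
    have hc : ∀ r : Nat, ((r : Int) = 0 ∨ (r : Int) = 1) ↔ (r = 0 ∨ r = 1) := by intro r; omega
    have hc2 : ∀ r : Nat, ((r : Int) = 2 ∨ (r : Int) = 3) ↔ (r = 2 ∨ r = 3) := by intro r; omega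
    have hc3 : ∀ r : Nat, ((r : Int) = 4 ∨ (r : Int) = 5) ↔ (r = 4 ∨ r = 5) := by intro r; omega
    simp only [hc, hc2, hc3]
    split_ifs <;> ring
  calc List.foldl _ 0 (List.range answer.toList.length)
      = List.foldl (fun acc j => acc + gA answer.toList j) 0 (List.range answer.toList.length) := by
        apply PySem.List.foldl_congr_mem
        intro acc j _
        exact hbody acc j
    _ = 0 + ((List.range answer.toList.length).map (gA answer.toList)).sum :=
        PySem.List.foldl_add _ _ _
    _ = _ := by ring

-- the letter the key carries at residue r
def patC (r : Nat) : Char := if r < 2 then 'C' else if r < 4 then 'A' else 'B'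

-- the flattened replicated pattern, read at any in-range index, is the pattern at the index's residue
lemma key_getElem (m i : Nat) (h : i < 6 * m) :
    ((List.replicate m ("CCAABB".toList)).flatten)[i]? = some (patC (i % 6)) := by
  induction m generalizing i with
  | zero => omega
  | succ m ih =>
    have hrep : List.replicate (m + 1) ("CCAABB".toList) = "CCAABB".toList :: List.replicate m ("CCAABB".toList) := rfl
    rw [hrep, List.flatten_cons]
    by_cases h6 : i < 6
    · interval_cases i <;> rfl
    · have hlen : ("CCAABB".toList).length = 6 := rfl
      rw [List.getElem?_append_right (by omega)]
      rw [hlen]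
      have : (i - 6) % 6 = i % 6 := by omega
      rw [ih (i - 6) (by omega), this]

-- B's zip-sum as an index sum (key at least as long as l)
lemma zip_sum_eq (l key : List Char) (h : l.length ≤ key.length) :
    ((l.zip key).map (fun p => if p.1 = p.2 then (1 : Int) else 0)).sum
      = ((List.range l.length).map (fun i => if l[i]? = key[i]? then (1 : Int) else 0)).sum := by
  induction l generalizing key with
  | nil => simp
  | cons c t ih =>
    cases key with
    | nil => simp at h
    | cons k kt =>
      simp only [List.zip_cons_cons, List.map_cons, List.sum_cons, List.length_cons,
        List.range_succ_eq_map, List.map_map]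
      rw [ih kt (by simpa using h)]
      have h0 : (if c = k then (1 : Int) else 0) = if (c::t)[0]? = (k::kt)[0]? then (1 : Int) else 0 := by simp
      rw [h0]
      congr 1

-- pointwise: A's branch contribution equals the key comparison
lemma pointwise (l : List Char) (m i : Nat) (hi : i < l.length) (hm : i < 6 * m) :
    gA l i = if l[i]? = ((List.replicate m ("CCAABB".toList)).flatten)[i]? then (1 : Int) else 0 := by
  rw [key_getElem m i hm]
  obtain ⟨c, hc⟩ : ∃ c, l[i]? = some c := ⟨l[i], List.getElem?_eq_getElem hi⟩
  rw [gA, hc]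
  have hr : i % 6 < 6 := Nat.mod_lt _ (by omega)
  set r := i % 6 with hrdef
  interval_cases r <;> simp [patC]

-- ===== VERDICT (by name: the statement is the Claim_ definition above) =====
theorem checkg_spec : Claim_equal_checkg := by
  intro answer _
  unfold Spec_checkg checkg_alt
  rw [checkg_eq_sum]
  set l := answer.toList with hl
  set m := l.length / 6 + 1 with hm
  have hkeylen : ((List.replicate m ("CCAABB".toList)).flatten).length = 6 * m := by
    simp [List.length_flatten, List.map_replicate]
    omega
  rw [zip_sum_eq l _ (by rw [hkeylen]; omega)]
  apply congrArg
  apply List.map_congr_left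
  intro i hi
  rw [List.mem_range] at hi
  exact pointwise l m i hi (by omega)
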